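-- pv_equiv track=rewrite | github.com/jennyzzt/LLM_debate_on_ARC | ARC_gen_agents3_rounds2_openai/b2862040/agent2/algo0.py | solve
-- ===== SOURCE A (Python) =====
-- def dfs(grid, x, y, visited):
--     # Check bounds and if the cell is already visited or not a '1'
--     if x < 0 or x >= len(grid) or y < 0 or y >= len(grid[0]) or visited[x][y] or grid[x][y] != 1:
--         return
--
--     # Mark the cell as visited and change its value to '8'
--     visited[x][y] = True
--     grid[x][y] = 8
--
--     # Explore the four adjacent directions
--     dfs(grid, x+1, y, visited)
--     dfs(grid, x-1, y, visited)
--     dfs(grid, x, y+1, visited)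
--     dfs(grid, x, y-1, visited)
--
-- def solve(input_grid):
--     # Create a copy of the input grid to modify
--     output_grid = [row[:] for row in input_grid]
--
--     # Initialize a visited matrix to keep track of visited cells during DFS
--     visited = [[False for _ in range(len(input_grid[0]))] for _ in range(len(input_grid))]
--
--     # Perform DFS for each cell
--     for i in range(len(input_grid)):
--         for j in range(len(input_grid[0])):
--             if input_grid[i][j] == 1 and not visited[i][j]:
--                 dfs(output_grid, i, j, visited)
--
--     return output_grid
-- ===== SOURCE B (Python) =====
-- def solve(input_grid):
--     # direct elementwise map: every 1 becomes 8, everything else unchanged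
--     return [[8 if v == 1 else v for v in row] for row in input_grid]
-- ===== Notes on version B (the rewrite author's own statement) =====
-- stated objective: simpler
-- what changed: Replaced the recursive flood-fill DFS with a visited matrix by a single elementwise comprehension mapping 1 to 8, since the DFS's net effect is exactly that map.
-- outside the precondition, e.g. on solve([[0], [1, 1]]): A returns [[0], [8, 1]], B returns [[0], [8, 8]]
import Mathlib
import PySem

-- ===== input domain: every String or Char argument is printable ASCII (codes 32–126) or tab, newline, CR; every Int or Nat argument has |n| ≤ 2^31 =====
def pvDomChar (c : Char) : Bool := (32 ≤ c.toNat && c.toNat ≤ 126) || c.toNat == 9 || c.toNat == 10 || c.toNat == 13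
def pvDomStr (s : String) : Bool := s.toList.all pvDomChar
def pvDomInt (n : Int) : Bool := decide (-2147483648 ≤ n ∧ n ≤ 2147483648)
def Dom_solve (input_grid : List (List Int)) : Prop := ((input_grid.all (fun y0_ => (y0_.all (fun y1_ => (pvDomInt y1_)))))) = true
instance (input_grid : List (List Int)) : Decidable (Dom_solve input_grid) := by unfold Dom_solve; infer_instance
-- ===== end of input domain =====

-- B replaces A's recursive flood-fill DFS with visited matrix by a single elementwise map 1 → 8
-- (the DFS's net effect): simpler, same O(n*m); return values agree on every input admitted by Pre_solve.

-- ===== PORT A =====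
-- g[x][y] with default d; A only reads/writes after its guards establish 0 ≤ x, 0 ≤ y, so .toNat is exact there
def gget {α : Type} (d : α) (g : List (List α)) (x y : Int) : α := (g.getD x.toNat []).getD y.toNat d

def pvGet2 (g : List (List Int)) (x y : Int) : Int := gget 0 g x y

def pvGetB (v : List (List Bool)) (x y : Int) : Bool := gget false v x y

-- grid[x][y] = a (rows are distinct lists in A: copied / freshly built)
def pvSet2 {α : Type} (g : List (List α)) (x y : Int) (a : α) : List (List α) :=
  g.set x.toNat ((g.getD x.toNat []).set y.toNat a)

-- dfs(grid, x, y, visited); the state is the pair (grid, visited).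
-- The Nat argument is pure fuel (a totality guard): each recursion level marks one previously
-- unvisited cell, so the fuel n*m+1 passed by solve is never exhausted (proved below).
def dfsF : Nat → (List (List Int) × List (List Bool)) → Int → Int → (List (List Int) × List (List Bool))
  | 0, s, _, _ => s
  | f+1, s, x, y =>
    if x < 0 ∨ (s.1.length : Int) ≤ x ∨ y < 0 ∨ ((s.1.headD []).length : Int) ≤ y ∨
       pvGetB s.2 x y = true ∨ pvGet2 s.1 x y ≠ 1 then s
    else
      -- visited[x][y] = True; grid[x][y] = 8; then the four recursive calls
      dfsF f (dfsF f (dfsF f (dfsF f (pvSet2 s.1 x y 8, pvSet2 s.2 x y true) (x+1) y) (x-1) y) x (y+1)) x (y-1)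

def solve (input_grid : List (List Int)) : List (List Int) :=
  let n := input_grid.length
  let m := (input_grid.headD []).length
  -- output_grid = [row[:] for row in input_grid]; visited = n×m all-False
  let s0 : List (List Int) × List (List Bool) := (input_grid, List.replicate n (List.replicate m false))
  let s := (List.range n).foldl (fun s (i : Nat) =>
      (List.range m).foldl (fun s (j : Nat) =>
        if pvGet2 input_grid (i : Int) (j : Int) = 1 ∧ pvGetB s.2 (i : Int) (j : Int) = false then
          dfsF (n * m + 1) s (i : Int) (j : Int)
        else s) s) s0
  s.1

-- ===== PORT B =====
def solve_alt (input_grid : List (List Int)) : List (List Int) :=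
  input_grid.map (fun row => row.map (fun v => if v = 1 then 8 else v))

-- ===== PRECONDITION & SPEC =====
-- helper for Pre_: some row has a 1 beyond column (width of row 0)
def pvHasOneBeyond (m : Nat) : List (List Int) → Bool
  | [] => false
  | r :: t => (r.drop m).contains 1 || pvHasOneBeyond m t

-- Pre_ excludes ragged grids, on which A's behaviour is accidental (ARC grids are rectangular):
-- with a row shorter than row 0 A raises IndexError, and a 1 sitting beyond row 0's width in a
-- longer row is invisible to A's row-0-width-bounded loops and DFS, so A returns it unreplaced
-- while B replaces it (see cites).
def Pre_solve (input_grid : List (List Int)) : Prop :=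
  (∀ r ∈ input_grid, (input_grid.headD []).length ≤ r.length) ∧
  pvHasOneBeyond (input_grid.headD []).length input_grid = false
instance (input_grid : List (List Int)) : Decidable (Pre_solve input_grid) := by unfold Pre_solve; infer_instance

def pvWitness_solve : List (List Int) := [[1, 0, 2], [3, 1, 1]]

def Spec_solve (input_grid : List (List Int)) (out : List (List Int)) : Prop := out = solve_alt input_grid
instance (input_grid : List (List Int)) (out : List (List Int)) : Decidable (Spec_solve input_grid out) := by unfold Spec_solve; infer_instance

-- ===== CLAIM (what is proved, stated in full; the proofs are below) =====
def Claim_equal_solve : Prop := ∀ (input_grid : List (List Int)), Dom_solve input_grid → Pre_solve input_grid → Spec_solve input_grid (solve input_grid)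

-- ===== LEMMAS AND PROOFS =====

-- shape of the visited matrix: n rows, all of length exactly m
def Shp {α : Type} (g : List (List α)) (n m : Nat) : Prop :=
  g.length = n ∧ ∀ r ∈ g, r.length = m

-- number of unvisited cells (the measure showing the fuel suffices)
def Unv (v : List (List Bool)) : Nat := (v.map (fun r => r.count false)).sum

-- the dfs/loop invariant relative to the original grid (row 0 has width m, no row is shorter;
-- rows may be longer: the cells at column indices ≥ m are never touched, the last clause).
def DfsInv (orig : List (List Int)) (n m : Nat) (s : List (List Int) × List (List Bool)) : Prop :=
  s.1.map List.length = orig.map List.length ∧ Shp s.2 n m ∧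
  (∀ x y : Int, 0 ≤ x → x < (n : Int) → 0 ≤ y → y < (m : Int) →
    (pvGetB s.2 x y = true → pvGet2 s.1 x y = 8 ∧ pvGet2 orig x y = 1) ∧
    (pvGetB s.2 x y = false → pvGet2 s.1 x y = pvGet2 orig x y)) ∧
  (∀ x y : Int, 0 ≤ x → 0 ≤ y → (m : Int) ≤ y → pvGet2 s.1 x y = pvGet2 orig x y)

lemma getD_set' {α : Type} (l : List α) (i j : Nat) (a d : α) :
    (l.set i a).getD j d = if i = j ∧ i < l.length then a else l.getD j d := by
  rw [List.getD_eq_getElem?_getD, List.getElem?_set, List.getD_eq_getElem?_getD]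
  by_cases h1 : i = j
  · subst h1
    by_cases h2 : i < l.length
    · simp [h2]
    · have : l[i]? = none := List.getElem?_eq_none (by omega)
      simp [h2]
  · simp [h1]

lemma shp_row {α : Type} {g : List (List α)} {n m : Nat} (h : Shp g n m) {k : Nat}
    (hk : k < g.length) : (g.getD k []).length = m := by
  rw [List.getD_eq_getElem _ _ hk]; exact h.2 _ (List.getElem_mem hk)

lemma shp_set2 {α : Type} {g : List (List α)} {n m : Nat} (h : Shp g n m) (x y : Int) (a : α) :
    Shp (pvSet2 g x y a) n m := by
  by_cases hk : x.toNat < g.length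
  · refine ⟨by simp [pvSet2, h.1], ?_⟩
    intro r hr
    rcases List.mem_or_eq_of_mem_set hr with hr' | rfl
    · exact h.2 _ hr'
    · simpa using shp_row h hk
  · unfold pvSet2
    rw [List.set_eq_of_length_le (Nat.le_of_not_lt hk)]
    exact h

-- row lengths are untouched by a cell write
lemma lens_set2 {α : Type} (g : List (List α)) (x y : Int) (a : α) :
    (pvSet2 g x y a).map List.length = g.map List.length := by
  unfold pvSet2
  by_cases hk : x.toNat < g.length
  · rw [List.map_set]
    have : ((g.getD x.toNat []).set y.toNat a).length
        = (g.map List.length)[x.toNat]'(by simpa using hk) := by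
      rw [List.length_set, List.getElem_map, List.getD_eq_getElem _ _ hk]
    rw [this, List.set_getElem_self]
  · rw [List.set_eq_of_length_le (Nat.le_of_not_lt hk)]

lemma lens_length {α : Type} {g h : List (List α)} (hl : g.map List.length = h.map List.length) :
    g.length = h.length := by
  have := congrArg List.length hl; simpa using this

lemma lens_row {α : Type} {g h : List (List α)} (hl : g.map List.length = h.map List.length)
    {k : Nat} : (g.getD k []).length = (h.getD k []).length := by
  have hlen : g.length = h.length := lens_length hl
  by_cases hk : k < g.length
  · have h1 := congrArg (fun l => l.getD k 0) hl
    simp only at h1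
    rw [List.getD_eq_getElem _ _ (by simpa using hk),
      List.getD_eq_getElem _ _ (by simpa using (by omega : k < h.length))] at h1
    simp only [List.getElem_map] at h1
    rw [List.getD_eq_getElem _ _ hk, List.getD_eq_getElem _ _ (by omega)]
    exact h1
  · rw [List.getD_eq_getElem?_getD, List.getD_eq_getElem?_getD,
      List.getElem?_eq_none (by omega), List.getElem?_eq_none (by omega)]

lemma lens_headD {α : Type} {g h : List (List α)} (hl : g.map List.length = h.map List.length) :
    (g.headD []).length = (h.headD []).length := by
  have h0 : ∀ (u : List (List α)), u.headD [] = u.getD 0 [] := by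
    intro u; cases u <;> simp
  rw [h0 g, h0 h]; exact lens_row hl

-- one cell write, seen through the reads (only the written cell changes)
lemma gget_set2 {α : Type} (d : α) {g : List (List α)} {x y x' y' : Int} (a : α)
    (hx : 0 ≤ x) (hk : x.toNat < g.length) (hy : 0 ≤ y)
    (hj : y.toNat < (g.getD x.toNat []).length) (hx' : 0 ≤ x') (hy' : 0 ≤ y') :
    gget d (pvSet2 g x y a) x' y' = if x' = x ∧ y' = y then a else gget d g x' y' := by
  unfold gget pvSet2
  rw [getD_set']
  by_cases hxx : x.toNat = x'.toNat
  · rw [if_pos ⟨hxx, hk⟩, getD_set']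
    by_cases hyy : y.toNat = y'.toNat
    · rw [if_pos ⟨hyy, by omega⟩, if_pos (by omega)]
    · rw [if_neg (fun hc => hyy hc.1), if_neg (by omega), hxx]
  · rw [if_neg (fun hc => hxx hc.1), if_neg (by omega)]

-- a visited mark is never erased (no bounds assumptions needed)
lemma gget_mono {v : List (List Bool)} {x y a b : Int}
    (h : gget false v a b = true) : gget false (pvSet2 v x y true) a b = true := by
  unfold gget pvSet2 at *
  rw [getD_set']
  by_cases h1 : x.toNat = a.toNat ∧ x.toNat < v.length
  · rw [if_pos h1, getD_set']
    by_cases h2 : y.toNat = b.toNat ∧ y.toNat < (v.getD x.toNat []).length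
    · rw [if_pos h2]
    · rw [if_neg h2, h1.1]; exact h
  · rw [if_neg h1]; exact h

lemma sum_set_nat (l : List Nat) (k : Nat) (b : Nat) (h : k < l.length) :
    (l.set k b).sum + l[k] = l.sum + b := by
  induction l generalizing k with
  | nil => simp at h
  | cons c l ih =>
    cases k with
    | zero => simp [List.set]; omega
    | succ k =>
      simp only [List.set, List.sum_cons, List.getElem_cons_succ]
      have := ih k (by simpa using h)
      omega

lemma unv_set2_lt {v : List (List Bool)} {n m : Nat} (h : Shp v n m) {x y : Int}
    (hx : 0 ≤ x) (hxn : x < (n : Int)) (hy : 0 ≤ y) (hym : y < (m : Int))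
    (hfalse : gget false v x y = false) : Unv (pvSet2 v x y true) < Unv v := by
  have hvl : v.length = n := h.1
  have hk : x.toNat < v.length := by omega
  have hrow : (v.getD x.toNat []).length = m := shp_row h hk
  have hj : y.toNat < (v.getD x.toNat []).length := by omega
  have hget : (v.getD x.toNat [])[y.toNat] = false := by
    unfold gget at hfalse
    rwa [List.getD_eq_getElem _ _ hj] at hfalse
  have hcount : ((v.getD x.toNat []).set y.toNat true).count false
      = (v.getD x.toNat []).count false - 1 := by
    rw [List.count_set hj, hget]
    simp
  have hpos : 0 < (v.getD x.toNat []).count false := by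
    rw [List.count_pos_iff]
    exact hget ▸ List.getElem_mem hj
  unfold Unv pvSet2
  rw [List.map_set]
  have hk2 : x.toNat < (v.map (fun r => r.count false)).length := by simpa using hk
  have hsum := sum_set_nat (v.map (fun r => r.count false)) x.toNat
      (((v.getD x.toNat []).set y.toNat true).count false) hk2
  have hvx : v[x.toNat] = v.getD x.toNat [] := (List.getD_eq_getElem v [] hk).symm
  have hElem : (v.map (fun r => r.count false))[x.toNat]'hk2 = (v.getD x.toNat []).count false := by
    rw [List.getElem_map]; rw [hvx]
  rw [hElem] at hsum
  omega

lemma shp_unv_le {v : List (List Bool)} {n m : Nat} (h : Shp v n m) : Unv v ≤ n * m := by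
  have := List.sum_le_card_nsmul (v.map (fun r => r.count false)) m ?_
  · simpa [Unv, h.1, Nat.mul_comm] using this
  · intro x hx
    rcases List.mem_map.1 hx with ⟨r, hr, rfl⟩
    exact le_trans List.count_le_length (le_of_eq (h.2 r hr))

lemma dfs_main (orig : List (List Int)) (n m : Nat)
    (hn : orig.length = n) (hm : (orig.headD []).length = m)
    (hPre : ∀ r ∈ orig, m ≤ r.length) :
    ∀ f s (x y : Int), DfsInv orig n m s → Unv s.2 < f →
      DfsInv orig n m (dfsF f s x y) ∧
      Unv (dfsF f s x y).2 ≤ Unv s.2 ∧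
      (∀ a b : Int, pvGetB s.2 a b = true → pvGetB (dfsF f s x y).2 a b = true) ∧
      (0 ≤ x → x < (n : Int) → 0 ≤ y → y < (m : Int) → pvGet2 orig x y = 1 →
        pvGetB (dfsF f s x y).2 x y = true) := by
  intro f
  induction f with
  | zero => intro s x y _ hU; omega
  | succ f ih =>
    intro s x y hInv hU
    obtain ⟨hLens, hShpV, hIn, hOut⟩ := hInv
    have hgl : s.1.length = n := by rw [lens_length hLens, hn]
    have hhead : (s.1.headD []).length = m := by rw [lens_headD hLens, hm]
    rw [dfsF]
    split
    case isTrue hguard =>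
      refine ⟨⟨hLens, hShpV, hIn, hOut⟩, le_refl _, fun a b hb => hb, ?_⟩
      intro hx hxn hy hym h1
      rcases hguard with hbad | hbad | hbad | hbad | hvis | hval
      · omega
      · omega
      · omega
      · omega
      · exact hvis
      · cases hv : pvGetB s.2 x y with
        | true => rfl
        | false =>
          have := (hIn x y hx hxn hy hym).2 hv
          rw [this] at hval
          exact absurd h1 hval
    case isFalse hguard =>
      push_neg at hguard
      obtain ⟨hx0, hxn1, hy0, hym1, hvisne, hval⟩ := hguard
      have hvis : pvGetB s.2 x y = false := by simpa using hvisne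
      have hxn : x < (n : Int) := by omega
      have hym : y < (m : Int) := by omega
      have horig : pvGet2 orig x y = 1 := by
        have := (hIn x y hx0 hxn hy0 hym).2 hvis
        rw [← this]; exact hval
      -- bounds for the two writes
      have hgk : x.toNat < s.1.length := by omega
      have hgrowlen : (s.1.getD x.toNat []).length = (orig.getD x.toNat []).length := lens_row hLens
      have horiglen : m ≤ (orig.getD x.toNat []).length := by
        have : x.toNat < orig.length := by omega
        rw [List.getD_eq_getElem _ _ this]
        exact hPre _ (List.getElem_mem this)
      have hgj : y.toNat < (s.1.getD x.toNat []).length := by omega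
      have hvk : x.toNat < s.2.length := by rw [hShpV.1]; omega
      have hvj : y.toNat < (s.2.getD x.toNat []).length := by rw [shp_row hShpV hvk]; omega
      set s1 : List (List Int) × List (List Bool) := (pvSet2 s.1 x y 8, pvSet2 s.2 x y true) with hs1
      have hInv1 : DfsInv orig n m s1 := by
        refine ⟨(lens_set2 s.1 x y 8).trans hLens, shp_set2 hShpV x y true, ?_, ?_⟩
        · intro a b ha han hb hbm
          have hA := gget_set2 (0 : Int) (g := s.1) (8 : Int) hx0 hgk hy0 hgj ha hb
          have hB := gget_set2 false (g := s.2) true hx0 hvk hy0 hvj ha hb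
          rw [show pvGet2 s1.1 a b = gget (0:Int) (pvSet2 s.1 x y 8) a b from rfl]
          rw [show pvGetB s1.2 a b = gget false (pvSet2 s.2 x y true) a b from rfl]
          rw [hA, hB]
          by_cases hab : a = x ∧ b = y
          · rw [if_pos hab, if_pos hab]
            constructor
            · intro _; exact ⟨rfl, hab.1 ▸ hab.2 ▸ horig⟩
            · intro hfalse; exact absurd hfalse (by simp)
          · rw [if_neg hab, if_neg hab]
            exact hIn a b ha han hb hbm
        · intro a b ha hb hbm
          have hA := gget_set2 (0 : Int) (g := s.1) (8 : Int) hx0 hgk hy0 hgj ha hb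
          rw [show pvGet2 s1.1 a b = gget (0:Int) (pvSet2 s.1 x y 8) a b from rfl]
          rw [hA, if_neg (fun hc => by omega)]
          exact hOut a b ha hb hbm
      have hU1 : Unv s1.2 < Unv s.2 := unv_set2_lt hShpV hx0 hxn hy0 hym hvis
      have hmark1 : pvGetB s1.2 x y = true := by
        show gget false (pvSet2 s.2 x y true) x y = true
        rw [gget_set2 false (g := s.2) true hx0 hvk hy0 hvj hx0 hy0]
        rw [if_pos ⟨rfl, rfl⟩]
      obtain ⟨I1, U1, M1, _⟩ := ih s1 (x+1) y hInv1 (by omega)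
      obtain ⟨I2, U2, M2, _⟩ := ih (dfsF f s1 (x+1) y) (x-1) y I1 (by omega)
      obtain ⟨I3, U3, M3, _⟩ := ih (dfsF f (dfsF f s1 (x+1) y) (x-1) y) x (y+1) I2 (by omega)
      obtain ⟨I4, U4, M4, _⟩ := ih (dfsF f (dfsF f (dfsF f s1 (x+1) y) (x-1) y) x (y+1)) x (y-1) I3 (by omega)
      refine ⟨I4, by omega, ?_, ?_⟩
      · intro a b hb
        exact M4 _ _ (M3 _ _ (M2 _ _ (M1 _ _ (gget_mono hb))))
      · intro _ _ _ _ _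
        exact M4 _ _ (M3 _ _ (M2 _ _ (M1 _ _ hmark1)))

-- the inner loop over j ∈ range m, for a fixed i
lemma inner_loop (orig : List (List Int)) (n m : Nat)
    (hn : orig.length = n) (hm : (orig.headD []).length = m)
    (hPre : ∀ r ∈ orig, m ≤ r.length) (i : Nat) :
    ∀ (l : List Nat), (∀ j ∈ l, j < m) → ∀ s, DfsInv orig n m s →
      DfsInv orig n m (l.foldl (fun s (j : Nat) =>
          if pvGet2 orig (i : Int) (j : Int) = 1 ∧ pvGetB s.2 (i : Int) (j : Int) = false then
            dfsF (n * m + 1) s (i : Int) (j : Int) else s) s) ∧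
      (∀ a b : Int, pvGetB s.2 a b = true →
        pvGetB (l.foldl (fun s (j : Nat) =>
          if pvGet2 orig (i : Int) (j : Int) = 1 ∧ pvGetB s.2 (i : Int) (j : Int) = false then
            dfsF (n * m + 1) s (i : Int) (j : Int) else s) s).2 a b = true) ∧
      (i < n → ∀ j ∈ l, pvGet2 orig (i : Int) (j : Int) = 1 →
        pvGetB (l.foldl (fun s (j : Nat) =>
          if pvGet2 orig (i : Int) (j : Int) = 1 ∧ pvGetB s.2 (i : Int) (j : Int) = false then
            dfsF (n * m + 1) s (i : Int) (j : Int) else s) s).2 (i : Int) (j : Int) = true) := by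
  intro l
  induction l with
  | nil => intro _ s hInv; exact ⟨hInv, fun a b hb => hb, fun _ j hj => absurd hj (List.not_mem_nil)⟩
  | cons j l ih =>
    intro hl s hInv
    simp only [List.foldl_cons]
    have hjm : j < m := hl j (by simp)
    have hUf : Unv s.2 < n * m + 1 := Nat.lt_succ_of_le (shp_unv_le hInv.2.1)
    by_cases hc : pvGet2 orig (i : Int) (j : Int) = 1 ∧ pvGetB s.2 (i : Int) (j : Int) = false
    · rw [if_pos hc]
      obtain ⟨I1, _, M1, P1⟩ := dfs_main orig n m hn hm hPre (n * m + 1) s (i : Int) (j : Int) hInv hUf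
      obtain ⟨I2, M2, P2⟩ := ih (fun j hj => hl j (by simp [hj])) _ I1
      refine ⟨I2, fun a b hb => M2 _ _ (M1 _ _ hb), ?_⟩
      intro hi j' hj' hone
      rcases List.mem_cons.1 hj' with rfl | hj'
      · exact M2 _ _ (P1 (by omega) (by omega) (by omega) (by omega) hone)
      · exact P2 hi j' hj' hone
    · rw [if_neg hc]
      obtain ⟨I2, M2, P2⟩ := ih (fun j hj => hl j (by simp [hj])) s hInv
      refine ⟨I2, M2, ?_⟩
      intro hi j' hj' hone
      rcases List.mem_cons.1 hj' with rfl | hj'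
      · have hvis : pvGetB s.2 (i : Int) (j' : Int) = true := by
          rcases Bool.eq_false_or_eq_true (pvGetB s.2 (i : Int) (j' : Int)) with hv | hv
          · exact hv
          · exact absurd ⟨hone, hv⟩ hc
        exact M2 _ _ hvis
      · exact P2 hi j' hj' hone

-- the outer loop over i ∈ range n
lemma outer_loop (orig : List (List Int)) (n m : Nat)
    (hn : orig.length = n) (hm : (orig.headD []).length = m)
    (hPre : ∀ r ∈ orig, m ≤ r.length) :
    ∀ (l : List Nat), ∀ s, DfsInv orig n m s →
      DfsInv orig n m (l.foldl (fun s (i : Nat) =>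
          (List.range m).foldl (fun s (j : Nat) =>
            if pvGet2 orig (i : Int) (j : Int) = 1 ∧ pvGetB s.2 (i : Int) (j : Int) = false then
              dfsF (n * m + 1) s (i : Int) (j : Int) else s) s) s) ∧
      (∀ a b : Int, pvGetB s.2 a b = true →
        pvGetB (l.foldl (fun s (i : Nat) =>
          (List.range m).foldl (fun s (j : Nat) =>
            if pvGet2 orig (i : Int) (j : Int) = 1 ∧ pvGetB s.2 (i : Int) (j : Int) = false then
              dfsF (n * m + 1) s (i : Int) (j : Int) else s) s) s).2 a b = true) ∧
      (∀ i ∈ l, i < n → ∀ j < m, pvGet2 orig (i : Int) (j : Int) = 1 →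
        pvGetB (l.foldl (fun s (i : Nat) =>
          (List.range m).foldl (fun s (j : Nat) =>
            if pvGet2 orig (i : Int) (j : Int) = 1 ∧ pvGetB s.2 (i : Int) (j : Int) = false then
              dfsF (n * m + 1) s (i : Int) (j : Int) else s) s) s).2 (i : Int) (j : Int) = true) := by
  intro l
  induction l with
  | nil => intro s hInv; exact ⟨hInv, fun a b hb => hb, fun i hi => absurd hi (List.not_mem_nil)⟩
  | cons i l ih =>
    intro s hInv
    simp only [List.foldl_cons]
    obtain ⟨I1, M1, P1⟩ := inner_loop orig n m hn hm hPre i (List.range m) (fun j hj => List.mem_range.1 hj) s hInv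
    obtain ⟨I2, M2, P2⟩ := ih _ I1
    refine ⟨I2, fun a b hb => M2 _ _ (M1 _ _ hb), ?_⟩
    intro i' hi' hin j hjm hone
    rcases List.mem_cons.1 hi' with rfl | hi'
    · exact M2 _ _ (P1 hin j (List.mem_range.2 hjm) hone)
    · exact P2 i' hi' hin j hjm hone

lemma gget_getElem {α : Type} (d : α) (g : List (List α)) (i j : Nat)
    (hi : i < g.length) (hj : j < (g[i]'hi).length) :
    gget d g (i : Int) (j : Int) = (g[i]'hi)[j]'hj := by
  unfold gget
  rw [Int.toNat_natCast, Int.toNat_natCast, List.getD_eq_getElem _ _ hi,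
    List.getD_eq_getElem _ _ hj]

lemma hasOneBeyond_iff (m : Nat) (l : List (List Int)) :
    pvHasOneBeyond m l = true ↔ ∃ r ∈ l, 1 ∈ r.drop m := by
  induction l with
  | nil => simp [pvHasOneBeyond]
  | cons r t ih => simp [pvHasOneBeyond, ih]

-- the final state of solve's double loop, with the facts both verdict proofs need
lemma solve_loop_facts (g : List (List Int)) (hPre : Pre_solve g) :
    DfsInv g g.length (g.headD []).length
      ((List.range g.length).foldl (fun s (i : Nat) =>
        (List.range (g.headD []).length).foldl (fun s (j : Nat) =>
          if pvGet2 g (i : Int) (j : Int) = 1 ∧ pvGetB s.2 (i : Int) (j : Int) = false then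
            dfsF (g.length * (g.headD []).length + 1) s (i : Int) (j : Int) else s) s)
        (g, List.replicate g.length (List.replicate (g.headD []).length false))) ∧
    (∀ i ∈ List.range g.length, i < g.length → ∀ j < (g.headD []).length,
      pvGet2 g (i : Int) (j : Int) = 1 →
      pvGetB ((List.range g.length).foldl (fun s (i : Nat) =>
        (List.range (g.headD []).length).foldl (fun s (j : Nat) =>
          if pvGet2 g (i : Int) (j : Int) = 1 ∧ pvGetB s.2 (i : Int) (j : Int) = false then
            dfsF (g.length * (g.headD []).length + 1) s (i : Int) (j : Int) else s) s)
        (g, List.replicate g.length (List.replicate (g.headD []).length false))).2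
        (i : Int) (j : Int) = true) := by
  set n := g.length with hn
  set m := (g.headD []).length with hm
  have hShpV : Shp (List.replicate n (List.replicate m false)) n m := by
    refine ⟨by simp, fun r hr => ?_⟩
    rw [List.eq_of_mem_replicate hr]; simp
  have hInv0 : DfsInv g n m (g, List.replicate n (List.replicate m false)) := by
    refine ⟨rfl, hShpV, ?_, fun _ _ _ _ _ => rfl⟩
    intro x y hx hxn hy hym
    have hvis : pvGetB (g, List.replicate n (List.replicate m false)).2 x y = false := by
      show gget false (List.replicate n (List.replicate m false)) x y = false
      unfold gget
      simp only [List.getD_eq_getElem?_getD, List.getElem?_replicate]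
      split_ifs <;> simp
    exact ⟨fun h => absurd (hvis ▸ h) (by simp), fun _ => rfl⟩
  obtain ⟨Ifin, _, Pfin⟩ := outer_loop g n m rfl rfl (fun r hr => hPre.1 r hr) (List.range n) _ hInv0
  exact ⟨Ifin, Pfin⟩

theorem solve_spec : Claim_equal_solve := by
  intro g _ hPre
  have hnD : ¬ (pvHasOneBeyond (g.headD []).length g = true) := by
    rw [hPre.2]; simp
  set n := g.length with hn
  set m := (g.headD []).length with hm
  obtain ⟨Ifin, Pfin⟩ := solve_loop_facts g hPre
  set t := (List.range n).foldl (fun s (i : Nat) =>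
      (List.range m).foldl (fun s (j : Nat) =>
        if pvGet2 g (i : Int) (j : Int) = 1 ∧ pvGetB s.2 (i : Int) (j : Int) = false then
          dfsF (n * m + 1) s (i : Int) (j : Int) else s) s)
      (g, List.replicate n (List.replicate m false)) with ht
  have hsolve : solve g = t.1 := rfl
  rw [hsolve]
  obtain ⟨hLens, _, hIn, hOut⟩ := Ifin
  -- pointwise description of t.1 (for columns < m)
  have hpoint : ∀ (i j : Nat) (hi : i < n) (hj : j < m),
      pvGet2 t.1 (i : Int) (j : Int) =
        (if pvGet2 g (i : Int) (j : Int) = 1 then 8 else pvGet2 g (i : Int) (j : Int)) := by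
    intro i j hi hj
    have hix : (0 : Int) ≤ (i : Int) := by omega
    have hin : (i : Int) < (n : Int) := by omega
    have hjy : (0 : Int) ≤ (j : Int) := by omega
    have hjm : (j : Int) < (m : Int) := by omega
    by_cases h1 : pvGet2 g (i : Int) (j : Int) = 1
    · have hvis : pvGetB t.2 (i : Int) (j : Int) = true :=
        Pfin i (List.mem_range.2 hi) hi j hj h1
      have := (hIn (i : Int) (j : Int) hix hin hjy hjm).1 hvis
      rw [if_pos h1]; exact this.1
    · cases hv : pvGetB t.2 (i : Int) (j : Int) with
      | true =>
        have := (hIn (i : Int) (j : Int) hix hin hjy hjm).1 hv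
        exact absurd this.2 h1
      | false =>
        have := (hIn (i : Int) (j : Int) hix hin hjy hjm).2 hv
        rw [this, if_neg h1]
  -- turn the pointwise equality into a list equality
  have hlen1 : t.1.length = n := by rw [lens_length hLens, hn]
  apply List.ext_getElem
  · rw [hlen1, hn]; simp [solve_alt]
  · intro i h1 h2
    have hi : i < n := by omega
    have hgi : i < g.length := by omega
    have hrowlen : (t.1[i]'h1).length = (g[i]'hgi).length := by
      have := lens_row hLens (k := i)
      rwa [List.getD_eq_getElem _ _ h1, List.getD_eq_getElem _ _ hgi] at this
    apply List.ext_getElem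
    · rw [hrowlen]
      simp [solve_alt]
    · intro j hj1 hj2
      have hL := gget_getElem (0 : Int) t.1 i j h1 (by omega)
      have hR := gget_getElem (0 : Int) g i j hgi (by omega)
      by_cases hjm : j < m
      · have hp := hpoint i j hi hjm
        rw [show pvGet2 t.1 (i:Int) (j:Int) = gget (0:Int) t.1 (i:Int) (j:Int) from rfl] at hp
        rw [show pvGet2 g (i:Int) (j:Int) = gget (0:Int) g (i:Int) (j:Int) from rfl] at hp
        rw [hL, hR] at hp
        simp only [solve_alt, List.getElem_map]
        exact hp
      · -- column index ≥ m: A never touched the cell, and it is not a 1 (else D_solve)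
        have hone : (g[i]'hgi)[j]'(by omega) ≠ 1 := by
          intro hval
          apply hnD
          rw [hasOneBeyond_iff]
          refine ⟨g[i]'hgi, List.getElem_mem hgi, ?_⟩
          rw [List.mem_iff_getElem]
          refine ⟨j - m, by rw [List.length_drop]; omega, ?_⟩
          rw [List.getElem_drop]
          have hidx : (g[i]'hgi)[m + (j - m)]'(by omega) = (g[i]'hgi)[j]'(by omega) := by
            congr 1
            omega
          rw [hidx]
          exact hval
        have hp := hOut (i : Int) (j : Int) (by omega) (by omega) (by omega)
        rw [show pvGet2 t.1 (i:Int) (j:Int) = gget (0:Int) t.1 (i:Int) (j:Int) from rfl] at hp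
        rw [show pvGet2 g (i:Int) (j:Int) = gget (0:Int) g (i:Int) (j:Int) from rfl] at hp
        rw [hL, hR] at hp
        simp only [solve_alt, List.getElem_map]
        rw [hp, if_neg hone]
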